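-- pv_equiv track=rewrite | github.com/illusyn/ProblemEditor2 | markdown_parser.py | process_enumeration_items
-- ===== SOURCE A (Python) =====
-- def process_enumeration_items(content):
--     """
--     Process and consolidate enumeration items into proper LaTeX lists
--
--     Args:
--         content (str): Processed content with individual enum items
--
--     Returns:
--         str: Content with proper LaTeX enumeration environments
--     """
--     # Find isolated \item entries and consolidate them into environments
--     lines = content.split('\n')
--     result_lines = []
--
--     # Tracking enum state
--     in_enum = False
--     current_enum = []
--
--     for line in lines:
--         if line.strip().startswith('\\item '):
--             if not in_enum:
--                 # Start a new enumeration
--                 in_enum = True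
--                 current_enum = ["\\begin{enumerate}"]
--
--             # Add the item
--             current_enum.append(line)
--         else:
--             if in_enum:
--                 # Close the current enumeration
--                 current_enum.append("\\end{enumerate}")
--                 result_lines.extend(current_enum)
--                 in_enum = False
--                 current_enum = []
--
--             # Add the non-enum line
--             result_lines.append(line)
--
--     # Don't forget to close the last enum if there is one
--     if in_enum:
--         current_enum.append("\\end{enumerate}")
--         result_lines.extend(current_enum)
--
--     return '\n'.join(result_lines)
-- ===== SOURCE B (Python) =====
-- def process_enumeration_items(content):
--     """Wrap maximal runs of '\\item ' lines in enumerate environments.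
--
--     Run-scanning re-implementation (two-index scan over runs) of the
--     in_enum/current_enum state machine; same output, no trailing-flush state.
--     """
--     lines = content.split('\n')
--     is_item = lambda line: line.strip().startswith('\\item ')
--     out = []
--     i = 0
--     n = len(lines)
--     while i < n:
--         if is_item(lines[i]):
--             j = i
--             while j < n and is_item(lines[j]):
--                 j += 1
--             out.append('\\begin{enumerate}')
--             out.extend(lines[i:j])
--             out.append('\\end{enumerate}')
--             i = j
--         else:
--             out.append(lines[i])
--             i += 1
--     return '\n'.join(out)
-- ===== Notes on version B (the rewrite author's own statement) =====
-- stated objective: alternative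
-- what changed: Replaces the in_enum/current_enum state machine with trailing flush by a run-scanning loop that finds each maximal run of \item lines and emits it wrapped in one enumerate environment.
import Mathlib
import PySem

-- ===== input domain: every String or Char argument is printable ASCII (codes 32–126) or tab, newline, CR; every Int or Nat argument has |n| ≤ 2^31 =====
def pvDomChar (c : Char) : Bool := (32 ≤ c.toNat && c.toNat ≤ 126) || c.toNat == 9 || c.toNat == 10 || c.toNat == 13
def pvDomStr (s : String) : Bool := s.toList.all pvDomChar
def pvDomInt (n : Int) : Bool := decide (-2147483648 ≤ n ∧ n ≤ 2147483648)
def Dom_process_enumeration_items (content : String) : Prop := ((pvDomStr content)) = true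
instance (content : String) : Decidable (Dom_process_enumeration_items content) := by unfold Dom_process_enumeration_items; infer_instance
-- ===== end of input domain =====

-- B replaces A's in_enum/current_enum state machine (with trailing flush) by a
-- run-scanning loop over maximal runs of '\item ' lines; same return value.

-- line.strip().startswith('\item ')  (shared predicate of both versions)
def pvIsItem (line : List Char) : Bool :=
  PySem.Chars.startswith (PySem.Chars.strip line) "\\item ".toList

-- ===== PORT A =====
-- loop body: state = (result_lines, in_enum, current_enum)
def pvAStep (st : List (List Char) × Bool × List (List Char)) (line : List Char) :
    List (List Char) × Bool × List (List Char) :=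
  if pvIsItem line then
    (st.1, true, if st.2.1 then st.2.2 ++ [line] else ["\\begin{enumerate}".toList, line])
  else if st.2.1 then
    (st.1 ++ st.2.2 ++ ["\\end{enumerate}".toList] ++ [line], false, [])
  else
    (st.1 ++ [line], false, [])

-- final flush: close the last enum if there is one
def pvAFin (st : List (List Char) × Bool × List (List Char)) : List (List Char) :=
  if st.2.1 then st.1 ++ st.2.2 ++ ["\\end{enumerate}".toList] else st.1

def process_enumeration_items (content : String) : String :=
  String.ofList (PySem.Chars.join ['\n']
    (pvAFin ((PySem.Chars.splitOn content.toList ['\n']).foldl pvAStep ([], false, []))))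

-- ===== PORT B =====
-- scan: each maximal run of item lines is emitted wrapped; other lines as-is
def pvRuns : List (List Char) → List (List Char)
  | [] => []
  | l :: ls =>
    if pvIsItem l then
      "\\begin{enumerate}".toList :: (l :: ls.takeWhile pvIsItem) ++
        "\\end{enumerate}".toList :: pvRuns (ls.dropWhile pvIsItem)
    else
      l :: pvRuns ls
termination_by ls => ls.length
decreasing_by
  · exact Nat.lt_succ_of_le (ls.length_dropWhile_le pvIsItem)
  · exact Nat.lt_succ_self _

def process_enumeration_items_alt (content : String) : String :=
  String.ofList (PySem.Chars.join ['\n'] (pvRuns (PySem.Chars.splitOn content.toList ['\n'])))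

-- ===== PRECONDITION & SPEC =====
def Spec_process_enumeration_items (content : String) (out : String) : Prop := out = process_enumeration_items_alt content
instance (content : String) (out : String) : Decidable (Spec_process_enumeration_items content out) := by unfold Spec_process_enumeration_items; infer_instance

-- ===== CLAIM (what is proved, stated in full; the proofs are below) =====
def Claim_equal_process_enumeration_items : Prop := ∀ (content : String), Dom_process_enumeration_items content → Spec_process_enumeration_items content (process_enumeration_items content)

-- ===== LEMMAS AND PROOFS =====

-- A's loop (plus final flush), from either reachable state, produces B's runs.
lemma pvLoop_runs (ls : List (List Char)) :
    (∀ res, pvAFin (ls.foldl pvAStep (res, false, [])) = res ++ pvRuns ls) ∧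
    (∀ res cur, pvAFin (ls.foldl pvAStep (res, true, cur)) =
      res ++ cur ++ ls.takeWhile pvIsItem ++
        "\\end{enumerate}".toList :: pvRuns (ls.dropWhile pvIsItem)) := by
  induction ls with
  | nil => simp [pvAFin, pvRuns]
  | cons l ls ih =>
    by_cases h : pvIsItem l = true
    · constructor
      · intro res
        simp only [List.foldl_cons, pvAStep, h, if_true]
        rw [ih.2]
        simp [pvRuns, h]
      · intro res cur
        simp only [List.foldl_cons, pvAStep, h, if_true]
        rw [ih.2]
        simp [h]
    · constructor
      · intro res
        simp only [List.foldl_cons, pvAStep, h, Bool.false_eq_true, if_false]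
        rw [ih.1]
        simp [pvRuns, h]
      · intro res cur
        simp only [List.foldl_cons, pvAStep, h, Bool.false_eq_true, if_false]
        rw [if_pos trivial, ih.1]
        simp [pvRuns, h]

-- ===== VERDICT (by name: the statement is the Claim_ definition above) =====
theorem process_enumeration_items_spec : Claim_equal_process_enumeration_items := by
  intro content _
  unfold Spec_process_enumeration_items process_enumeration_items process_enumeration_items_alt
  rw [(pvLoop_runs (PySem.Chars.splitOn content.toList ['\n'])).1 []]
  simp
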